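-- pv_equiv track=rewrite | github.com/SoyoungHeoo/soyoung | work_0118.py | get_odds
-- ===== SOURCE A (Python) =====
-- def get_odds(first=0, last=10):
--     '''
--     입력받은 범위 안에서 홀수를 반환하는 제너레이터함수
--     :param first: integer
--     :param last: integer
--     :return: generator
--     '''
--     number = first
--     while number < last:        # 이번 차례의 수가 범위안에 해당할 때
--         if (number % 2 == 1):   # 이번 차례의 수가 홀수라면
--             yield number        # 값 내놓기
--             number += 2         # 2를 더해서 다음 홀수 만들기
--         else:                   # 이번 차례의 수가 홀수가 아니라면
--             number += 1         # 1을 더해서 홀수로 만들기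
-- ===== SOURCE B (Python) =====
-- def get_odds(first=0, last=10):
--     '''B: closed-form count of odds in [first, last), then indexed generation
--     over range(count) -- no while loop and no comparison against last inside.'''
--     start = first + (first + 1) % 2        # first odd value >= first
--     count = (last - start + 1) // 2        # how many odds lie in [start, last)
--     for k in range(count):
--         yield start + 2 * k
-- ===== Notes on version B (the rewrite author's own statement) =====
-- stated objective: alternative
-- what changed: B computes the count of odds in [first, last) in closed form and generates them by index over range(count), replacing A's while loop that tests parity and compares against last on every step.
import Mathlib
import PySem

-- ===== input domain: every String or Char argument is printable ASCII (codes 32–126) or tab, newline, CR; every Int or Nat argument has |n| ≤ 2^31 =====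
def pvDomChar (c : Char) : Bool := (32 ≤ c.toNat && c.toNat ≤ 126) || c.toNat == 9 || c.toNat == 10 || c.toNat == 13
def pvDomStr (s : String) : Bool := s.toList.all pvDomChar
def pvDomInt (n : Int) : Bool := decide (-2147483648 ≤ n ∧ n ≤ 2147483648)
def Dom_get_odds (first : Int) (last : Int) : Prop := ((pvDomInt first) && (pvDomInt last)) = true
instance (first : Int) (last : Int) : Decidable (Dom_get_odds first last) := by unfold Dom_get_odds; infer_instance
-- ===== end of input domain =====

-- B replaces A's while loop by a closed-form count of the odds and indexed generation over range(count) (simpler).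


-- termination measure lemma, cited by A's recursion
theorem pv_step_lt {last n k : Int} (h : n < last) (hk : 0 < k) :
    (last - (n + k)).toNat < (last - n).toNat := by omega

-- ===== PORT A =====
-- A's while loop: test parity each iteration, step +2 from an odd, +1 from an even.
def get_odds_go (last number : Int) : List Int :=
  if h : number < last then
    if number % 2 == 1 then number :: get_odds_go last (number + 2)
    else get_odds_go last (number + 1)
  else []
termination_by (last - number).toNat
decreasing_by
  · exact pv_step_lt h (by decide)
  · exact pv_step_lt h (by decide)

def get_odds (first : Int) (last : Int) : List Int := get_odds_go last first

-- ===== PORT B =====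
-- B: closed-form start and count, then 'for k in range(count): yield start + 2*k'.
def get_odds_alt (first : Int) (last : Int) : List Int :=
  let start := first + PySem.Int.mod (first + 1) 2
  let count := PySem.Int.floordiv (last - start + 1) 2
  (PySem.List.pyRange 0 count 1).map (fun k => start + 2 * k)

-- ===== PRECONDITION & SPEC =====
def Spec_get_odds (first : Int) (last : Int) (out : List Int) : Prop := out = get_odds_alt first last
instance (first : Int) (last : Int) (out : List Int) : Decidable (Spec_get_odds first last out) := by unfold Spec_get_odds; infer_instance

-- ===== CLAIM (what is proved, stated in full; the proofs are below) =====
def Claim_equal_get_odds : Prop := ∀ (first : Int) (last : Int), Dom_get_odds first last → Spec_get_odds first last (get_odds first last)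

-- ===== LEMMAS AND PROOFS =====

-- A's loop, started at an ODD value s, produces exactly the arithmetic
-- progression s, s+2, … of length ((last - s + 1) // 2  if positive).
theorem get_odds_go_odd (last s : Int) (hs : s % 2 = 1) :
    get_odds_go last s
      = (List.range ((last - s + 1) / 2).toNat).map (fun k : Nat => s + 2 * (k : Int)) := by
  by_cases hlt : s < last
  · have h2 : (s + 2) % 2 = 1 := by omega
    have ih := get_odds_go_odd last (s + 2) h2
    have hc : ((last - s + 1) / 2).toNat = ((last - (s + 2) + 1) / 2).toNat + 1 := by omega
    rw [get_odds_go.eq_def]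
    simp only [hlt, dif_pos, hs, beq_self_eq_true, if_true, ih, hc,
      List.range_succ_eq_map, List.map_cons, List.map_map]
    refine List.cons_eq_cons.mpr ⟨by push_cast; ring, ?_⟩
    apply List.map_congr_left
    intro k _
    simp [Function.comp]
    ring
  · have hc : ((last - s + 1) / 2).toNat = 0 := by omega
    rw [get_odds_go.eq_def]
    simp [hlt, hc]
termination_by (last - s).toNat
decreasing_by exact pv_step_lt hlt (by decide)

-- ===== VERDICT (by name: the statement is the Claim_ definition above) =====
theorem get_odds_spec : Claim_equal_get_odds := by
  intro first last _
  show get_odds first last = get_odds_alt first last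
  have h2 : (0:Int) < 2 := by decide
  rw [get_odds, get_odds_alt]
  simp only [PySem.Int.mod_eq_emod_of_pos h2, PySem.Int.floordiv_eq_ediv_of_pos h2,
    PySem.List.pyRange_one]
  rcases Int.emod_two_eq_zero_or_one first with heven | hodd
  · -- first even: start = first + 1, and A's first step goes there (or both are empty)
    have hm : (first + 1) % 2 = 1 := by omega
    have hstart : first + (first + 1) % 2 = first + 1 := by omega
    rw [hstart]
    by_cases hlt : first < last
    · rw [get_odds_go.eq_def]
      have hne : (first % 2 == 1) = false := by simp [heven]
      simp only [hlt, dif_pos, hne]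
      rw [get_odds_go_odd last (first + 1) hm]
      simp
    · have hc : ((last - (first + 1) + 1) / 2).toNat = 0 := by omega
      rw [get_odds_go.eq_def]
      simp [hlt, hc]
  · have hstart : first + (first + 1) % 2 = first := by omega
    rw [hstart, get_odds_go_odd last first hodd]
    simp
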